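-- pv_equiv track=rewrite | github.com/erev0s/Mobilytix | mcp_server/tools/static/web_hybrid.py | _merge_asset_scans
-- ===== SOURCE A (Python) =====
-- from typing import Any, Optional
--
-- MAX_ITEMS = 25
--
-- def _merge_asset_scans(scans: list[dict[str, Any]]) -> dict[str, Any]:
--     merged: dict[str, list] = {
--         "urls": [],
--         "js_interfaces": [],
--         "postmessage_calls": [],
--         "window_location_assignments": [],
--         "auth_tokens": [],
--     }
--     seen: dict[str, set] = {k: set() for k in merged}
--     for scan in scans:
--         for key in merged:
--             for item in scan.get(key, []):
--                 if item not in seen[key] and len(merged[key]) < MAX_ITEMS: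
--                     seen[key].add(item)
--                     merged[key].append(item)
--     return merged
-- ===== SOURCE B (Python) =====
-- MAX_ITEMS = 25
--
-- def _merge_asset_scans(scans):
--     keys = ["urls", "js_interfaces", "postmessage_calls",
--             "window_location_assignments", "auth_tokens"]
--     merged = {}
--     for key in keys:
--         # gather every item for this key across all scans
--         items = []
--         for scan in scans:
--             items += scan.get(key, [])
--         # index each distinct item by the position of its first occurrence
--         first = {}
--         for i, item in enumerate(items):
--             if item not in first:
--                 first[item] = i
--         # order the distinct items by that first-occurrence index, cap afterwards
--         merged[key] = sorted(first, key=first.get)[:MAX_ITEMS]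
--     return merged
-- ===== Notes on version B (the rewrite author's own statement) =====
-- stated objective: alternative
-- what changed: Replaces A's single interleaved pass (mutating per-key seen-sets with an inline length guard) by a per-key staged pipeline: gather all items, build a first-occurrence-index map, sort the distinct items by that index, then slice to MAX_ITEMS.
import Mathlib
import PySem

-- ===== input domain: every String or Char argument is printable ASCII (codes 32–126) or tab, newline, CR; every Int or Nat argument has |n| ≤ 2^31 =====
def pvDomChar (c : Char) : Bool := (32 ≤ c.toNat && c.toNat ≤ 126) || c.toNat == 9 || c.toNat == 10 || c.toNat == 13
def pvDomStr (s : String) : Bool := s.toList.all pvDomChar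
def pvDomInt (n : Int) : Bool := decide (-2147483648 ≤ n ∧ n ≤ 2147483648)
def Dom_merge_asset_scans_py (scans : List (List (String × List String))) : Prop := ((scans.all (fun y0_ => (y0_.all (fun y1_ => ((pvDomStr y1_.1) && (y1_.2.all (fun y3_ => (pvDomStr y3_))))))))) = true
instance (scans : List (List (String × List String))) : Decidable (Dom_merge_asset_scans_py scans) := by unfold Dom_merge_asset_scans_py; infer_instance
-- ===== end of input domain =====

-- B replaces A's single interleaved pass (per-key seen-sets with an inline length
-- guard) by a staged per-key pipeline: gather all items, index each distinct item by
-- its first-occurrence position, sort by that index, then slice to MAX_ITEMS; same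
-- return value, proved below (objective: alternative).

-- ===== PORT A =====
-- the five keys of the `merged` dict literal, in insertion order
def pvKeysA : List String :=
  ["urls", "js_interfaces", "postmessage_calls", "window_location_assignments", "auth_tokens"]

-- body of `for item in scan.get(key, [])`: guard `item not in seen[key] and len(merged[key]) < MAX_ITEMS`,
-- then `seen[key].add(item)` and `merged[key].append(item)` (state = (merged, seen))
def pvStepItem (key : String)
    (st : PySem.Dict String (List String) × PySem.Dict String (PySem.Set String))
    (item : String) :
    PySem.Dict String (List String) × PySem.Dict String (PySem.Set String) :=
  if item ∉ st.2.getD key [] ∧ (st.1.getD key []).length < 25 then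
    (st.1.modify key [] (fun l => l ++ [item]),
     st.2.modify key [] (fun s => PySem.Set.add s item))
  else st

-- body of `for scan in scans`: `for key in merged` iterates merged's keys, which stay pvKeysA
def pvStepScan
    (st : PySem.Dict String (List String) × PySem.Dict String (PySem.Set String))
    (scan : List (String × List String)) :
    PySem.Dict String (List String) × PySem.Dict String (PySem.Set String) :=
  pvKeysA.foldl
    (fun st key => ((PySem.Dict.mk scan).getD key []).foldl (pvStepItem key) st) st

def merge_asset_scans_py (scans : List (List (String × List String))) :
    List (String × List String) :=
  let merged : PySem.Dict String (List String) := PySem.Dict.mk (pvKeysA.map (fun k => (k, [])))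
  let seen : PySem.Dict String (PySem.Set String) := PySem.Dict.mk (pvKeysA.map (fun k => (k, [])))
  (scans.foldl pvStepScan (merged, seen)).1.items

-- ===== PORT B =====
-- `if item not in first: first[item] = i` for one (i, item) pair of enumerate(items)
def pvFirstStep (d : PySem.Dict String Int) (p : Int × String) : PySem.Dict String Int :=
  if d.contains p.2 then d else d.insert p.2 p.1

def merge_asset_scans_py_alt (scans : List (List (String × List String))) :
    List (String × List String) :=
  let keys : List String :=
    ["urls", "js_interfaces", "postmessage_calls", "window_location_assignments", "auth_tokens"]
  -- `merged` is built key by key in `keys` order, so it is the map below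
  keys.map (fun key =>
    -- items = []; for scan in scans: items += scan.get(key, [])
    let items : List String :=
      scans.foldl (fun acc scan => acc ++ (PySem.Dict.mk scan).getD key []) []
    -- first = {}; for i, item in enumerate(items): if item not in first: first[item] = i
    let first : PySem.Dict String Int :=
      (PySem.List.enumerate items 0).foldl pvFirstStep PySem.Dict.empty
    -- sorted(first, key=first.get)[:MAX_ITEMS]; first.get(k) = first.getD k 0 on first's keys
    (key, (PySem.List.sorted first.keys (fun k => first.getD k 0) false).take 25))

-- ===== PRECONDITION & SPEC =====
def Spec_merge_asset_scans_py (scans : List (List (String × List String))) (out : List (String × List String)) : Prop := out = merge_asset_scans_py_alt scans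
instance (scans : List (List (String × List String))) (out : List (String × List String)) : Decidable (Spec_merge_asset_scans_py scans out) := by unfold Spec_merge_asset_scans_py; infer_instance

-- ===== CLAIM (what is proved, stated in full; the proofs are below) =====
def Claim_equal_merge_asset_scans_py : Prop := ∀ (scans : List (List (String × List String))), Dom_merge_asset_scans_py scans → Spec_merge_asset_scans_py scans (merge_asset_scans_py scans)

-- ===== LEMMAS AND PROOFS =====

-- ---- A-side: A's interleaved pass computes, per key, dedup-then-take-25 ----

-- pure per-key step on (merged[key], seen[key])
def pvPairStep (p : List String × PySem.Set String) (x : String) :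
    List String × PySem.Set String :=
  if x ∉ p.2 ∧ p.1.length < 25 then (p.1 ++ [x], PySem.Set.add p.2 x) else p

-- pure per-key step when merged[key] and seen[key] coincide
def pvLStep (l : List String) (x : String) : List String :=
  if x ∉ l ∧ l.length < 25 then l ++ [x] else l

lemma pvPairStep_dup (xs : List String) (l : List String) :
    xs.foldl pvPairStep (l, l) = (xs.foldl pvLStep l, xs.foldl pvLStep l) := by
  induction xs generalizing l with
  | nil => rfl
  | cons x xs ih =>
    simp only [List.foldl_cons, pvPairStep, pvLStep]
    split_ifs with h
    · rw [PySem.Set.add_of_not_mem h.1]; exact ih (l ++ [x])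
    · exact ih l

lemma pvLStep_dedup (ys : List String) (x : String) :
    pvLStep ((PySem.List.dedup ys).take 25) x = (PySem.List.dedup (ys ++ [x])).take 25 := by
  simp only [PySem.List.dedup_eq_ofList, PySem.Set.ofList_append_singleton, pvLStep]
  by_cases hge : 25 ≤ (PySem.Set.ofList ys).length
  · have hlen : ((PySem.Set.ofList ys).take 25).length = 25 := by
      simp [Nat.min_eq_left hge]
    rw [if_neg (by omega)]
    rw [PySem.Set.add_eq_ite]
    split_ifs with hx
    · rfl
    · rw [List.take_append_of_le_length hge]
  · have hlt : (PySem.Set.ofList ys).length < 25 := by omega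
    rw [List.take_of_length_le (le_of_lt hlt)]
    by_cases hx : x ∈ PySem.Set.ofList ys
    · rw [if_neg (by simp [hx]), PySem.Set.add_of_mem hx,
          List.take_of_length_le (le_of_lt hlt)]
    · rw [if_pos ⟨hx, hlt⟩, PySem.Set.add_of_not_mem hx,
          List.take_of_length_le (by simp only [List.length_append, List.length_cons, List.length_nil]; omega)]

lemma pvLStep_fold (xs ys : List String) :
    xs.foldl pvLStep ((PySem.List.dedup ys).take 25) = (PySem.List.dedup (ys ++ xs)).take 25 := by
  induction xs generalizing ys with
  | nil => simp
  | cons x xs ih =>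
    rw [List.foldl_cons, pvLStep_dedup, ih (ys ++ [x])]
    simp

-- an inner item loop at `key` leaves the entries at a different key untouched
lemma pvItemFold_ne (key k : String) (h : k ≠ key) (xs : List String)
    (st : PySem.Dict String (List String) × PySem.Dict String (PySem.Set String)) :
    (xs.foldl (pvStepItem key) st).1.getD k [] = st.1.getD k [] ∧
    (xs.foldl (pvStepItem key) st).2.getD k [] = st.2.getD k [] := by
  induction xs generalizing st with
  | nil => exact ⟨rfl, rfl⟩
  | cons x xs ih =>
    rw [List.foldl_cons]
    rcases ih (pvStepItem key st x) with ⟨h1, h2⟩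
    refine ⟨h1.trans ?_, h2.trans ?_⟩ <;>
      simp only [pvStepItem] <;> split_ifs <;>
        simp [PySem.Dict.getD_modify_of_ne _ _ _ h]

-- an inner item loop at `key`, seen at `key`, is the pure pair fold
lemma pvItemFold_eq (key : String) (xs : List String)
    (st : PySem.Dict String (List String) × PySem.Dict String (PySem.Set String)) :
    ((xs.foldl (pvStepItem key) st).1.getD key [],
     (xs.foldl (pvStepItem key) st).2.getD key []) =
      xs.foldl pvPairStep (st.1.getD key [], st.2.getD key []) := by
  induction xs generalizing st with
  | nil => rfl
  | cons x xs ih =>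
    rw [List.foldl_cons, List.foldl_cons, ih (pvStepItem key st x)]
    congr 1
    simp only [pvStepItem, pvPairStep]
    split_ifs <;> simp [PySem.Dict.getD_modify_self]

-- keys of the merged dict never change through an inner item loop
lemma pvItemFold_keys (key : String) (xs : List String)
    (st : PySem.Dict String (List String) × PySem.Dict String (PySem.Set String))
    (hc : st.1.contains key = true) :
    (xs.foldl (pvStepItem key) st).1.keys = st.1.keys := by
  induction xs generalizing st with
  | nil => rfl
  | cons x xs ih =>
    rw [List.foldl_cons]
    have hc' : (pvStepItem key st x).1.contains key = true := by
      simp only [pvStepItem]; split_ifs <;> simp [PySem.Dict.contains_modify, hc]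
    rw [ih _ hc']
    simp only [pvStepItem]; split_ifs with h
    · rw [PySem.Dict.keys_modify, PySem.Dict.keys_insert_of_contains _ _ hc]
    · rfl

lemma pvKeyFold_ne (keys : List String) (k : String) (hk : k ∉ keys)
    (scan : List (String × List String))
    (st : PySem.Dict String (List String) × PySem.Dict String (PySem.Set String)) :
    ((keys.foldl (fun st key => ((PySem.Dict.mk scan).getD key []).foldl (pvStepItem key) st) st).1.getD k [] = st.1.getD k []) ∧
    ((keys.foldl (fun st key => ((PySem.Dict.mk scan).getD key []).foldl (pvStepItem key) st) st).2.getD k [] = st.2.getD k []) := by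
  induction keys generalizing st with
  | nil => exact ⟨rfl, rfl⟩
  | cons key keys ih =>
    have hne : k ≠ key := fun h => hk (by simp [h])
    have hk' : k ∉ keys := fun h => hk (by simp [h])
    rw [List.foldl_cons]
    rcases ih hk' (((PySem.Dict.mk scan).getD key []).foldl (pvStepItem key) st) with ⟨h1, h2⟩
    rcases pvItemFold_ne key k hne ((PySem.Dict.mk scan).getD key []) st with ⟨g1, g2⟩
    exact ⟨h1.trans g1, h2.trans g2⟩

lemma pvKeyFold_getD (keys : List String) (k : String) (hk : k ∈ keys) (hnd : keys.Nodup)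
    (scan : List (String × List String))
    (st : PySem.Dict String (List String) × PySem.Dict String (PySem.Set String)) :
    ((keys.foldl (fun st key => ((PySem.Dict.mk scan).getD key []).foldl (pvStepItem key) st) st).1.getD k [],
     (keys.foldl (fun st key => ((PySem.Dict.mk scan).getD key []).foldl (pvStepItem key) st) st).2.getD k []) =
      ((PySem.Dict.mk scan).getD k []).foldl pvPairStep (st.1.getD k [], st.2.getD k []) := by
  induction keys generalizing st with
  | nil => cases hk
  | cons key keys ih =>
    rw [List.foldl_cons]
    by_cases hkey : k = key
    · subst hkey
      have hnot : k ∉ keys := (List.nodup_cons.mp hnd).1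
      rcases pvKeyFold_ne keys k hnot scan (((PySem.Dict.mk scan).getD k []).foldl (pvStepItem k) st) with ⟨h1, h2⟩
      rw [h1, h2]
      exact pvItemFold_eq k ((PySem.Dict.mk scan).getD k []) st
    · have hk' : k ∈ keys := by rcases List.mem_cons.mp hk with h | h; exact absurd h hkey; exact h
      rw [ih hk' (List.nodup_cons.mp hnd).2]
      rcases pvItemFold_ne key k hkey ((PySem.Dict.mk scan).getD key []) st with ⟨g1, g2⟩
      rw [g1, g2]

lemma pvScanStep_getD (k : String) (hk : k ∈ pvKeysA)
    (st : PySem.Dict String (List String) × PySem.Dict String (PySem.Set String))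
    (scan : List (String × List String)) :
    ((pvStepScan st scan).1.getD k [], (pvStepScan st scan).2.getD k []) =
      ((PySem.Dict.mk scan).getD k []).foldl pvPairStep (st.1.getD k [], st.2.getD k []) :=
  pvKeyFold_getD pvKeysA k hk (by decide) scan st

lemma pvKeyFold_keys (keys : List String)
    (scan : List (String × List String))
    (st : PySem.Dict String (List String) × PySem.Dict String (PySem.Set String))
    (hsub : ∀ key ∈ keys, key ∈ st.1.keys) :
    (keys.foldl (fun st key => ((PySem.Dict.mk scan).getD key []).foldl (pvStepItem key) st) st).1.keys = st.1.keys := by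
  induction keys generalizing st with
  | nil => rfl
  | cons key keys ih =>
    rw [List.foldl_cons]
    have hc : st.1.contains key = true :=
      (PySem.Dict.contains_iff_mem_keys _ _).mpr (hsub key (by simp))
    have hkeys := pvItemFold_keys key ((PySem.Dict.mk scan).getD key []) st hc
    rw [ih _ (by intro k' hk'; rw [hkeys]; exact hsub k' (by simp [hk']))]
    exact hkeys

lemma pvScansFold_keys (scans : List (List (String × List String)))
    (st : PySem.Dict String (List String) × PySem.Dict String (PySem.Set String))
    (hk : st.1.keys = pvKeysA) :
    (scans.foldl pvStepScan st).1.keys = pvKeysA := by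
  induction scans generalizing st with
  | nil => exact hk
  | cons scan scans ih =>
    rw [List.foldl_cons]
    exact ih _ (by rw [pvStepScan, pvKeyFold_keys _ _ _ (by rw [hk]; exact fun k h => h)]; exact hk)

-- projection of the whole scans fold at a key of pvKeysA
lemma pvScansFold_getD (k : String) (hk : k ∈ pvKeysA)
    (scans : List (List (String × List String)))
    (st : PySem.Dict String (List String) × PySem.Dict String (PySem.Set String)) :
    ((scans.foldl pvStepScan st).1.getD k [], (scans.foldl pvStepScan st).2.getD k []) =
      (scans.flatMap (fun scan => (PySem.Dict.mk scan).getD k [])).foldl pvPairStep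
        (st.1.getD k [], st.2.getD k []) := by
  rw [List.foldl_flatMap]
  induction scans generalizing st with
  | nil => rfl
  | cons scan scans ih =>
    rw [List.foldl_cons, List.foldl_cons, ih, pvScanStep_getD k hk]

-- ---- B-side: the first-occurrence-index map, sorted by its values, is the ordered dedup ----

-- the entries B's `first` loop appends: first occurrences not in `avoid`, paired with their index
def pvFirstOcc (avoid : List String) (n : Int) : List String → List (String × Int)
  | [] => []
  | x :: xs => if x ∈ avoid then pvFirstOcc avoid (n + 1) xs
               else (x, n) :: pvFirstOcc (avoid ++ [x]) (n + 1) xs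

lemma pvFirstFold_items (xs : List String) (n : Int) (d : PySem.Dict String Int) :
    ((PySem.List.enumerate xs n).foldl pvFirstStep d).items = d.items ++ pvFirstOcc d.keys n xs := by
  induction xs generalizing n d with
  | nil => simp [PySem.List.enumerate_nil, pvFirstOcc]
  | cons x xs ih =>
    rw [PySem.List.enumerate_cons, List.foldl_cons]
    simp only [pvFirstStep, pvFirstOcc]
    by_cases hx : x ∈ d.keys
    · rw [if_pos ((PySem.Dict.contains_iff_mem_keys _ _).mpr hx), if_pos hx, ih]
    · have hc : d.contains x = false := by
        cases h : d.contains x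
        · rfl
        · exact absurd ((PySem.Dict.contains_iff_mem_keys _ _).mp h) hx
      rw [if_neg (by simp [hc]), if_neg hx, ih,
          PySem.Dict.items_insert_of_not_contains _ _ hc,
          PySem.Dict.keys_insert_of_not_contains _ _ hc]
      simp

lemma pvFirstOcc_fst (avoid : List String) (n : Int) (xs : List String) :
    avoid ++ (pvFirstOcc avoid n xs).map Prod.fst = PySem.Set.update avoid xs := by
  induction xs generalizing avoid n with
  | nil => simp [pvFirstOcc, PySem.Set.update]
  | cons x xs ih =>
    simp only [pvFirstOcc]
    by_cases hx : x ∈ avoid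
    · rw [if_pos hx, PySem.Set.update_cons, PySem.Set.add_of_mem hx, ih]
    · rw [if_neg hx, PySem.Set.update_cons, PySem.Set.add_of_not_mem hx]
      simpa using ih (avoid ++ [x]) (n + 1)

lemma pvFirstOcc_le (avoid : List String) (n : Int) (xs : List String) :
    ∀ p ∈ pvFirstOcc avoid n xs, n ≤ p.2 := by
  induction xs generalizing avoid n with
  | nil => simp [pvFirstOcc]
  | cons x xs ih =>
    simp only [pvFirstOcc]
    split_ifs with hx
    · exact fun p hp => le_trans (by omega) (ih avoid (n + 1) p hp)
    · intro p hp
      rcases List.mem_cons.mp hp with h | h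
      · simp [h]
      · exact le_trans (by omega) (ih (avoid ++ [x]) (n + 1) p h)

lemma pvFirstOcc_pairwise (avoid : List String) (n : Int) (xs : List String) :
    (pvFirstOcc avoid n xs).Pairwise (fun a b => a.2 < b.2) := by
  induction xs generalizing avoid n with
  | nil => simp [pvFirstOcc]
  | cons x xs ih =>
    simp only [pvFirstOcc]
    split_ifs with hx
    · exact ih avoid (n + 1)
    · exact List.pairwise_cons.mpr
        ⟨fun p hp => lt_of_lt_of_le (by omega) (pvFirstOcc_le _ _ _ p hp), ih (avoid ++ [x]) (n + 1)⟩

-- B's sorted-by-first-index list of distinct items IS the ordered dedup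
lemma pvSorted_first (items : List String) :
    PySem.List.sorted
      ((PySem.List.enumerate items 0).foldl pvFirstStep PySem.Dict.empty).keys
      (fun k => ((PySem.List.enumerate items 0).foldl pvFirstStep PySem.Dict.empty).getD k 0)
      false = PySem.List.dedup items := by
  set d := (PySem.List.enumerate items 0).foldl pvFirstStep PySem.Dict.empty with hd
  have hitems : d.items = pvFirstOcc [] 0 items := by
    rw [hd, pvFirstFold_items]; rfl
  have hkeys : d.keys = PySem.List.dedup items := by
    have h := pvFirstOcc_fst [] 0 items
    simp only [List.nil_append] at h
    have h' : d.items.map Prod.fst = PySem.List.dedup items := by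
      rw [hitems, h, PySem.List.dedup_eq_ofList]
      rfl
    exact h'
  have hnd : d.keys.Nodup := by rw [hkeys]; exact PySem.List.nodup_dedup items
  have hpw : d.keys.Pairwise (fun a b => d.getD a 0 < d.getD b 0) := by
    have hp : d.items.Pairwise (fun a b => a.2 < b.2) := by
      rw [hitems]; exact pvFirstOcc_pairwise [] 0 items
    have hp2 : d.items.Pairwise (fun a b => d.getD a.1 0 < d.getD b.1 0) := by
      refine List.Pairwise.imp_of_mem (fun {a b} ha hb hlt => ?_) hp
      rw [PySem.Dict.getD_of_mem_items d (show (a.1, a.2) ∈ d.items by simpa using ha) hnd 0,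
          PySem.Dict.getD_of_mem_items d (show (b.1, b.2) ∈ d.items by simpa using hb) hnd 0]
      exact hlt
    have : (d.items.map Prod.fst).Pairwise (fun a b => d.getD a 0 < d.getD b 0) :=
      List.pairwise_map.mpr hp2
    exact this
  have hs := PySem.List.sorted_eq_of_perm_of_pairwise_lt d.keys d.keys
    (fun k => d.getD k 0) (List.Perm.refl _) hpw
  rw [hs, hkeys]

-- gathering with `items += …` is the flat map
lemma pvGather_eq (scans : List (List (String × List String))) (key : String) :
    scans.foldl (fun acc scan => acc ++ (PySem.Dict.mk scan).getD key []) [] =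
      scans.flatMap (fun scan => (PySem.Dict.mk scan).getD key []) := by
  rw [PySem.List.foldl_append_eq_flatMap, List.nil_append]

-- B computes, per key, dedup-then-take-25 of the flat map
lemma pvAlt_eq (scans : List (List (String × List String))) :
    merge_asset_scans_py_alt scans =
      pvKeysA.map (fun k =>
        (k, (PySem.List.dedup (scans.flatMap (fun scan => (PySem.Dict.mk scan).getD k []))).take 25)) := by
  unfold merge_asset_scans_py_alt pvKeysA
  refine List.map_congr_left (fun k _ => ?_)
  show (k, (PySem.List.sorted
      ((PySem.List.enumerate (scans.foldl (fun acc scan => acc ++ (PySem.Dict.mk scan).getD k []) []) 0).foldl pvFirstStep PySem.Dict.empty).keys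
      (fun x => ((PySem.List.enumerate (scans.foldl (fun acc scan => acc ++ (PySem.Dict.mk scan).getD k []) []) 0).foldl pvFirstStep PySem.Dict.empty).getD x 0)
      false).take 25) =
    (k, (PySem.List.dedup (scans.flatMap (fun scan => (PySem.Dict.mk scan).getD k []))).take 25)
  rw [pvGather_eq, pvSorted_first]

-- ===== VERDICT (by name: the statement is the Claim_ definition above) =====
theorem merge_asset_scans_py_spec : Claim_equal_merge_asset_scans_py := by
  intro scans _
  unfold Spec_merge_asset_scans_py merge_asset_scans_py
  rw [pvAlt_eq]
  set init : PySem.Dict String (List String) × PySem.Dict String (PySem.Set String) :=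
    (PySem.Dict.mk (pvKeysA.map (fun k => (k, []))),
     PySem.Dict.mk (pvKeysA.map (fun k => (k, [])))) with hinit
  have hkeys : (scans.foldl pvStepScan init).1.keys = pvKeysA :=
    pvScansFold_keys scans init (by rw [hinit]; decide)
  have hgetD : ∀ k ∈ pvKeysA, (scans.foldl pvStepScan init).1.getD k [] =
      (PySem.List.dedup (scans.flatMap (fun scan => (PySem.Dict.mk scan).getD k []))).take 25 := by
    intro k hk
    have h0 : init.1.getD k [] = ([] : List String) ∧ init.2.getD k [] = ([] : PySem.Set String) := by
      fin_cases hk <;> exact ⟨rfl, rfl⟩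
    have := pvScansFold_getD k hk scans init
    rw [h0.1] at this
    try rw [h0.2] at this
    rw [pvPairStep_dup] at this
    have hl : (scans.flatMap (fun scan => (PySem.Dict.mk scan).getD k [])).foldl pvLStep [] =
        (PySem.List.dedup (scans.flatMap (fun scan => (PySem.Dict.mk scan).getD k []))).take 25 := by
      have := pvLStep_fold (scans.flatMap (fun scan => (PySem.Dict.mk scan).getD k [])) []
      simpa using this
    have h1 := congrArg Prod.fst this
    simp only at h1
    rw [h1, hl]
  rw [PySem.Dict.items_eq_map_keys _ (by rw [hkeys]; decide) []]
  rw [hkeys]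
  exact List.map_congr_left (fun k hk => by rw [hgetD k hk])
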